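-- pv_equiv track=rewrite | github.com/fachrulrzy/shupping-helper | scraper/shopify_base.py | _keyword_matches
-- ===== SOURCE A (Python) =====
-- def _keyword_matches(keyword: str, product: dict) -> bool:
--     """Case-insensitive keyword match against product fields."""
--     kw = keyword.lower()
--     searchable = " ".join([
--         product.get("title", ""),
--         product.get("vendor", ""),
--         product.get("product_type", ""),
--         " ".join(product.get("tags", [])),
--     ]).lower()
--     return all(term in searchable for term in kw.split())
-- ===== SOURCE B (Python) =====
-- def _keyword_matches(keyword: str, product: dict) -> bool:
--     """Case-insensitive keyword match: eliminate terms field by field."""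
--     remaining = keyword.lower().split()
--     for field in (
--         product.get("title", ""),
--         product.get("vendor", ""),
--         product.get("product_type", ""),
--         " ".join(product.get("tags", [])),
--     ):
--         f = field.lower()
--         remaining = [t for t in remaining if t not in f]
--         if not remaining:
--             return True
--     return not remaining
-- ===== Notes on version B (the rewrite author's own statement) =====
-- stated objective: alternative
-- what changed: B maintains a worklist of still-unmatched search terms and makes one pass over the product fields, filtering out terms found in each lowercased field (early exit when the worklist empties), instead of A's per-term substring scan over one space-joined lowercased string; correct because whitespace-free terms cannot span the space-separated field boundaries.
import Mathlib
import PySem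

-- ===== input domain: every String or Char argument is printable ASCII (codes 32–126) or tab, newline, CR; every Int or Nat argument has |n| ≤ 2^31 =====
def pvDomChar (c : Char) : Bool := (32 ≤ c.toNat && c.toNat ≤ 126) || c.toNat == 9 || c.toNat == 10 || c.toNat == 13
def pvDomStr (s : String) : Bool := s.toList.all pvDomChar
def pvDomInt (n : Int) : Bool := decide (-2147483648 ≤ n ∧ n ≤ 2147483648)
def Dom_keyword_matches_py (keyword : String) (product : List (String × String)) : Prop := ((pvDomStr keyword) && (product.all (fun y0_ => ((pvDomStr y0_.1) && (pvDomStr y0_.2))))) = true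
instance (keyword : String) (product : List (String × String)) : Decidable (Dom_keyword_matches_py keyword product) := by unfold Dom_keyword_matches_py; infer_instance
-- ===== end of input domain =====

-- B replaces A's per-term scan over one space-joined lowercased string by a single pass over the
-- fields that filters a worklist of still-unmatched terms, with early exit (alternative, not faster).
-- Note: under the type convention product is a str->str dict, so Python's " ".join(product.get("tags", []))
-- joins the CHARACTERS of the tags string with spaces (and "" when the key is absent); both ports model that
-- literally, and product.get("tags", []) is modelled as getD "tags" "" since " ".join("") = " ".join([]) = "".

-- ===== PORT A =====
def keyword_matches_py (keyword : String) (product : List (String × String)) : Bool :=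
  let d := PySem.Dict.mk product
  let kw := PySem.Chars.lower keyword.toList
  let searchable := PySem.Chars.lower (PySem.Chars.join [' ']
    [ (d.getD "title" "").toList
    , (d.getD "vendor" "").toList
    , (d.getD "product_type" "").toList
    , PySem.Chars.join [' '] ((d.getD "tags" "").toList.map (fun c => [c])) ])
  (PySem.Chars.split₀ kw).all (fun term => PySem.Chars.isIn term searchable)

-- ===== PORT B =====
-- B's loop over the field tuple: filter the worklist by each lowercased field, early True when empty.
def pvEliminate : List (List Char) → List (List Char) → Bool
  | remaining, [] => remaining.isEmpty
  | remaining, field :: rest =>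
      let f := PySem.Chars.lower field
      let remaining' := remaining.filter (fun t => !PySem.Chars.isIn t f)
      if remaining'.isEmpty then true else pvEliminate remaining' rest

def keyword_matches_py_alt (keyword : String) (product : List (String × String)) : Bool :=
  let d := PySem.Dict.mk product
  pvEliminate (PySem.Chars.split₀ (PySem.Chars.lower keyword.toList))
    [ (d.getD "title" "").toList
    , (d.getD "vendor" "").toList
    , (d.getD "product_type" "").toList
    , PySem.Chars.join [' '] ((d.getD "tags" "").toList.map (fun c => [c])) ]

-- ===== PRECONDITION & SPEC =====
def Spec_keyword_matches_py (keyword : String) (product : List (String × String)) (out : Bool) : Prop := out = keyword_matches_py_alt keyword product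
instance (keyword : String) (product : List (String × String)) (out : Bool) : Decidable (Spec_keyword_matches_py keyword product out) := by unfold Spec_keyword_matches_py; infer_instance

-- ===== CLAIM (what is proved, stated in full; the proofs are below) =====
def Claim_equal_keyword_matches_py : Prop := ∀ (keyword : String) (product : List (String × String)), Dom_keyword_matches_py keyword product → Spec_keyword_matches_py keyword product (keyword_matches_py keyword product)

-- ===== LEMMAS AND PROOFS =====

-- every word produced by str.split() is whitespace-free
theorem split₀_go_no_space (s cur : List Char) (acc : List (List Char))
    (hcur : ∀ c ∈ cur, PySem.Chars.isspace c = false)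
    (hacc : ∀ w ∈ acc, ∀ c ∈ w, PySem.Chars.isspace c = false) :
    ∀ w ∈ PySem.Chars.split₀.go s cur acc, ∀ c ∈ w, PySem.Chars.isspace c = false := by
  induction s generalizing cur acc with
  | nil =>
    intro w hw
    simp only [PySem.Chars.split₀.go] at hw
    split at hw
    · exact hacc w (List.mem_reverse.mp hw)
    · rcases List.mem_cons.mp (List.mem_reverse.mp hw) with h | h
      · subst h; intro c hc; exact hcur c (List.mem_reverse.mp hc)
      · exact hacc w h
  | cons c rest ih =>
    intro w hw
    simp only [PySem.Chars.split₀.go] at hw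
    split at hw
    · split at hw
      · exact ih [] acc (by simp) hacc w hw
      · refine ih [] (cur.reverse :: acc) (by simp) ?_ w hw
        intro w' hw'
        rcases List.mem_cons.mp hw' with h | h
        · subst h; intro x hx; exact hcur x (List.mem_reverse.mp hx)
        · exact hacc w' h
    · rename_i hc
      refine ih (c :: cur) acc ?_ hacc w hw
      intro x hx
      rcases List.mem_cons.mp hx with h | h
      · subst h; simpa using hc
      · exact hcur x h

theorem split₀_no_space (s : List Char) :
    ∀ w ∈ PySem.Chars.split₀ s, ∀ c ∈ w, PySem.Chars.isspace c = false := by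
  exact split₀_go_no_space s [] [] (by simp) (by simp)

-- a sub avoiding c that is a prefix of a ++ c :: b is a prefix of a
theorem prefix_append_cons_of_not_mem {sub a b : List Char} {c : Char}
    (h : sub <+: a ++ c :: b) (hc : c ∉ sub) : sub <+: a := by
  induction a generalizing sub with
  | nil =>
    cases sub with
    | nil => exact List.nil_prefix
    | cons x s' =>
      rcases List.cons_prefix_cons.mp h with ⟨rfl, _⟩
      exact absurd (List.mem_cons_self) hc
  | cons y a' ih =>
    cases sub with
    | nil => exact List.nil_prefix
    | cons x s' =>
      rcases List.cons_prefix_cons.mp (by simpa using h) with ⟨rfl, hp⟩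
      exact List.cons_prefix_cons.mpr ⟨rfl, ih hp (fun hm => hc (List.mem_cons_of_mem _ hm))⟩

-- a sub avoiding the separator c cannot span the boundary
theorem infix_append_cons_iff {sub a b : List Char} {c : Char} (hc : c ∉ sub) :
    sub <:+: a ++ c :: b ↔ (sub <:+: a ∨ sub <:+: b) := by
  constructor
  · intro h
    induction a generalizing sub with
    | nil =>
      rcases List.infix_cons_iff.mp h with hp | hi
      · cases sub with
        | nil => exact Or.inl (List.nil_infix)
        | cons x s' =>
          rcases List.cons_prefix_cons.mp hp with ⟨rfl, _⟩
          exact absurd (List.mem_cons_self) hc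
      · exact Or.inr hi
    | cons y a' ih =>
      rcases List.infix_cons_iff.mp (by simpa using h) with hp | hi
      · cases sub with
        | nil => exact Or.inl (List.nil_infix)
        | cons x s' =>
          rcases List.cons_prefix_cons.mp hp with ⟨rfl, hp'⟩
          have := prefix_append_cons_of_not_mem hp' (fun hm => hc (List.mem_cons_of_mem _ hm))
          exact Or.inl ((List.cons_prefix_cons.mpr ⟨rfl, this⟩).isInfix)
      · rcases ih hc hi with h1 | h1
        · exact Or.inl (h1.trans (List.suffix_cons y a').isInfix)
        · exact Or.inr h1
  · rintro (h | h)
    · exact h.trans (List.prefix_append a (c :: b)).isInfix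
    · exact h.trans ((List.suffix_cons c b).trans (List.suffix_append a (c :: b))).isInfix

theorem lowerChar_space : PySem.Chars.lowerChar ' ' = ' ' := by decide

theorem isIn_lower_join (t l1 l2 l3 l4 : List Char) (ht : ' ' ∉ t) :
    PySem.Chars.isIn t (PySem.Chars.lower (PySem.Chars.join [' '] [l1, l2, l3, l4]))
      = ([l1, l2, l3, l4].any (fun f => PySem.Chars.isIn t (PySem.Chars.lower f))) := by
  have hj : PySem.Chars.lower (PySem.Chars.join [' '] [l1, l2, l3, l4])
      = PySem.Chars.lower l1 ++ ' ' :: (PySem.Chars.lower l2 ++ ' ' :: (PySem.Chars.lower l3 ++ ' ' :: PySem.Chars.lower l4)) := by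
    simp [PySem.Chars.join, List.intercalate, List.intersperse, PySem.Chars.lower, lowerChar_space]
  rw [hj, Bool.eq_iff_iff, PySem.Chars.isIn_iff_infix,
      infix_append_cons_iff ht, infix_append_cons_iff ht, infix_append_cons_iff ht]
  simp only [List.any_eq_true, List.mem_cons, List.not_mem_nil, or_false,
    PySem.Chars.isIn_iff_infix]
  constructor
  · rintro (h | h | h | h)
    exacts [⟨_, Or.inl rfl, h⟩, ⟨_, Or.inr (Or.inl rfl), h⟩,
      ⟨_, Or.inr (Or.inr (Or.inl rfl)), h⟩, ⟨_, Or.inr (Or.inr (Or.inr rfl)), h⟩]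
  · rintro ⟨f, (rfl | rfl | rfl | rfl), h⟩
    exacts [Or.inl h, Or.inr (Or.inl h), Or.inr (Or.inr (Or.inl h)), Or.inr (Or.inr (Or.inr h))]

-- filtering out the p-satisfying elements, then checking q, is 'p or q' on all elements
theorem all_filter_not {α : Type} (l : List α) (p q : α → Bool) :
    (l.filter (fun t => !p t)).all q = l.all (fun t => p t || q t) := by
  induction l with
  | nil => rfl
  | cons x xs ih =>
    by_cases hx : p x = true <;> simp [List.filter, List.all_cons, hx, ih]

-- B's elimination pass answers: every remaining term matches some field
theorem pvEliminate_eq_all (fs : List (List Char)) (rem : List (List Char)) :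
    pvEliminate rem fs
      = rem.all (fun t => fs.any (fun f => PySem.Chars.isIn t (PySem.Chars.lower f))) := by
  induction fs generalizing rem with
  | nil =>
    cases rem with
    | nil => rfl
    | cons x xs => simp [pvEliminate]
  | cons f fs ih =>
    simp only [pvEliminate]
    split
    · rename_i hemp
      rw [List.isEmpty_iff, List.filter_eq_nil_iff] at hemp
      symm
      simp only [List.all_eq_true]
      intro t ht
      have h := hemp t ht
      simp only [Bool.not_eq_true] at h
      simp only [List.any_cons, Bool.or_eq_true]
      exact Or.inl (by simpa using h)
    · rw [ih, all_filter_not]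
      simp [List.any_cons]

theorem all_congr_mem {α : Type} {l : List α} {p q : α → Bool}
    (h : ∀ x ∈ l, p x = q x) : l.all p = l.all q := by
  induction l with
  | nil => rfl
  | cons x xs ih =>
    simp only [List.all_cons, h x (by simp)]
    rw [ih (fun y hy => h y (List.mem_cons_of_mem _ hy))]

-- ===== VERDICT (by name: the statement is the Claim_ definition above) =====
theorem keyword_matches_py_spec : Claim_equal_keyword_matches_py := by
  intro keyword product _
  unfold Spec_keyword_matches_py keyword_matches_py keyword_matches_py_alt
  rw [pvEliminate_eq_all]
  apply all_congr_mem
  intro t ht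
  have hsp := split₀_no_space _ t ht
  have hspace : ' ' ∉ t := by
    intro hm
    have := hsp ' ' hm
    simp [PySem.Chars.isspace] at this
  exact isIn_lower_join t _ _ _ _ hspace
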